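-- pv_equiv track=rewrite | github.com/gydis/trace-predictive-coding | utils.py | get_input_indices
-- ===== SOURCE A (Python) =====
-- def get_input_indices(slice_num: int, input_string: str) -> list:
--     """
--     Produce a 2D list (time slices x 1-2) where for every time slice
--     it indicates the number of the input phoneme (by index in input string)
--     that should be active at that time slice.
--     1 or 2 phonemes can be active at a time slice due to overlap.
--     :param slice_num: Number of time slices
--     :param input_string: Input string
--     :return: 2D list of input phoneme indices
--     """
--     input_indices = []
--     i1 = -1
--     i2 = -1
--     for i in range(slice_num):
--         input_indices.append([])
--         if i % 14 == 0: i1 += 1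
--         if (i-7) % 14 == 0: i2 += 1
--         if 14 - (i % 14) > 3 and i1*2 < len(input_string):
--             input_indices[-1].append(i1 * 2)
--         if i2 >= 0 and 14 - ((i-7) % 14) > 3 and i2*2 + 1 < len(input_string):
--             input_indices[-1].append(i2 * 2 + 1)
--     return input_indices
-- ===== SOURCE B (Python) =====
-- def get_input_indices(slice_num: int, input_string: str) -> list:
--     n = max(slice_num, 0)
--     result = [[] for _ in range(n)]
--     L = len(input_string)
--     # even phoneme 2*k is active on slices [14k, 14k+11)
--     for k in range((L + 1) // 2):
--         for i in range(14 * k, min(14 * k + 11, n)):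
--             result[i].append(2 * k)
--     # odd phoneme 2*k+1 is active on slices [14k+7, 14k+18)
--     for k in range(L // 2):
--         for i in range(14 * k + 7, min(14 * k + 18, n)):
--             result[i].append(2 * k + 1)
--     return result
-- ===== Notes on version B (the rewrite author's own statement) =====
-- stated objective: alternative
-- what changed: Replaces A's per-slice scan with running counters i1/i2 and modular tests by a per-phoneme pass: each phoneme index p fills its contiguous window of slices ([14k,14k+11) for p=2k, [14k+7,14k+18) for p=2k+1) into a preallocated list, evens before odds.
import Mathlib
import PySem

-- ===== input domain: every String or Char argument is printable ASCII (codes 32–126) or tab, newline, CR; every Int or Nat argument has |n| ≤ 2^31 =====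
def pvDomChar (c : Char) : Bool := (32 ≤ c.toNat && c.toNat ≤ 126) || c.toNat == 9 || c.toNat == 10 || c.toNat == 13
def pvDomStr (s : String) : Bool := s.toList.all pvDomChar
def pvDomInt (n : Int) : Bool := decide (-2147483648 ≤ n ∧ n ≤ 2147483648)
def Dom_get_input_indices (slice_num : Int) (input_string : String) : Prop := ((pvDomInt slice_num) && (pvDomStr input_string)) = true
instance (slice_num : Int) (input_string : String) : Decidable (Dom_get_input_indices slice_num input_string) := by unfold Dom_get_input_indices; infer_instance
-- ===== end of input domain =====

-- B replaces A's per-slice scan with running counters by per-phoneme window filling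
-- into a preallocated list (alternative decomposition, same cost); return value only,
-- no argument is mutated.

-- ===== PORT A =====
-- loop body of A's single for-loop; state = (input_indices, i1, i2)
def pvStepA (L : Int) (st : List (List Int) × Int × Int) (i : Int) : List (List Int) × Int × Int :=
  -- input_indices.append([]) followed by appends to input_indices[-1] is modelled by
  -- building the cell and appending it once at the end of the iteration (exact).
  let i1 := if PySem.Int.mod i 14 = 0 then st.2.1 + 1 else st.2.1
  let i2 := if PySem.Int.mod (i - 7) 14 = 0 then st.2.2 + 1 else st.2.2
  let cell : List Int := if 14 - PySem.Int.mod i 14 > 3 ∧ i1 * 2 < L then [i1 * 2] else []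
  let cell : List Int :=
    if i2 ≥ 0 ∧ 14 - PySem.Int.mod (i - 7) 14 > 3 ∧ i2 * 2 + 1 < L then cell ++ [i2 * 2 + 1] else cell
  (st.1 ++ [cell], i1, i2)

def get_input_indices (slice_num : Int) (input_string : String) : List (List Int) :=
  ((PySem.List.pyRange 0 slice_num 1).foldl (pvStepA (PySem.Str.len input_string)) ([], -1, -1)).1

-- ===== PORT B =====
-- inner loop of Source B: for i in range(a, b): result[i].append(v)   (a ≥ 0 always in B)
def pvFill (v a b : Int) (res : List (List Int)) : List (List Int) :=
  (PySem.List.pyRange a b 1).foldl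
    (fun r i => PySem.List.pySetD r i ((PySem.List.pyGetD r i []) ++ [v])) res

def get_input_indices_alt (slice_num : Int) (input_string : String) : List (List Int) :=
  let n : Int := max slice_num 0
  let L : Int := PySem.Str.len input_string
  let result : List (List Int) := List.replicate n.toNat []
  -- even phoneme 2*k is active on slices [14k, 14k+11)
  let result := (PySem.List.pyRange 0 (PySem.Int.floordiv (L + 1) 2) 1).foldl
      (fun r k => pvFill (2 * k) (14 * k) (min (14 * k + 11) n) r) result
  -- odd phoneme 2*k+1 is active on slices [14k+7, 14k+18)
  (PySem.List.pyRange 0 (PySem.Int.floordiv L 2) 1).foldl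
      (fun r k => pvFill (2 * k + 1) (14 * k + 7) (min (14 * k + 18) n) r) result

-- ===== PRECONDITION & SPEC =====
def Spec_get_input_indices (slice_num : Int) (input_string : String) (out : List (List Int)) : Prop := out = get_input_indices_alt slice_num input_string
instance (slice_num : Int) (input_string : String) (out : List (List Int)) : Decidable (Spec_get_input_indices slice_num input_string out) := by unfold Spec_get_input_indices; infer_instance

-- ===== CLAIM (what is proved, stated in full; the proofs are below) =====
def Claim_equal_get_input_indices : Prop := ∀ (slice_num : Int) (input_string : String), Dom_get_input_indices slice_num input_string → Spec_get_input_indices slice_num input_string (get_input_indices slice_num input_string)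

-- ===== LEMMAS AND PROOFS =====

-- the common value of slice i: the cell both programs produce there
def pvCell (L i : Int) : List Int :=
  (if 14 - i % 14 > 3 ∧ ((i + 14) / 14 - 1) * 2 < L then [((i + 14) / 14 - 1) * 2] else []) ++
  (if (i + 7) / 14 - 1 ≥ 0 ∧ 14 - (i - 7) % 14 > 3 ∧ ((i + 7) / 14 - 1) * 2 + 1 < L
     then [((i + 7) / 14 - 1) * 2 + 1] else [])

-- ---- A side ----

lemma pvA_loop (L : Int) (m : Nat) :
    ((List.range m).map Int.ofNat).foldl (pvStepA L) ([], -1, -1) =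
      ((List.range m).map (fun j : Nat => pvCell L (j : Int)),
        ((m : Int) + 13) / 14 - 1, ((m : Int) + 6) / 14 - 1) := by
  induction m with
  | zero => norm_num
  | succ m ih =>
    rw [List.range_succ, List.map_append, List.foldl_append, ih]
    simp only [List.map_cons, List.map_nil, List.foldl_cons, List.foldl_nil]
    simp only [pvStepA, PySem.Int.mod_eq_emod_of_pos (show (0:Int) < 14 by norm_num),
      Int.ofNat_eq_natCast]
    have e1 : (if ((m:Int)) % 14 = 0 then ((m:Int) + 13) / 14 - 1 + 1 else ((m:Int) + 13) / 14 - 1)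
        = ((m:Int) + 14) / 14 - 1 := by split_ifs <;> omega
    have e2 : (if ((m:Int) - 7) % 14 = 0 then ((m:Int) + 6) / 14 - 1 + 1 else ((m:Int) + 6) / 14 - 1)
        = ((m:Int) + 7) / 14 - 1 := by split_ifs <;> omega
    rw [e1, e2]
    simp only [Prod.ext_iff]
    refine ⟨?_, by push_cast; omega, by push_cast; omega⟩
    rw [List.map_append]
    simp only [List.map_cons, List.map_nil]
    congr 1
    rw [pvCell]
    split_ifs <;> simp

lemma pvA_eq_map (slice_num : Int) (input_string : String) :
    get_input_indices slice_num input_string =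
      (List.range slice_num.toNat).map (fun j : Nat => pvCell (PySem.Str.len input_string) (j : Int)) := by
  have hr : PySem.List.pyRange 0 slice_num 1 = (List.range slice_num.toNat).map Int.ofNat := by
    rw [PySem.List.pyRange_one]
    simp
  rw [get_input_indices, hr, pvA_loop]

-- ---- B side ----

lemma pvFoldSet_length (l : List Int) (v : Int) (res : List (List Int)) :
    (l.foldl (fun r i => PySem.List.pySetD r i ((PySem.List.pyGetD r i []) ++ [v])) res).length
      = res.length := by
  induction l generalizing res with
  | nil => rfl
  | cons x xs ih => simp [ih, PySem.List.length_pySetD]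

lemma pvFill_length (v a b : Int) (res : List (List Int)) :
    (pvFill v a b res).length = res.length := pvFoldSet_length _ _ _

lemma pvFill_getD_aux (N : Nat) : ∀ (v a b : Int), (b - a).toNat ≤ N → 0 ≤ a →
    ∀ (res : List (List Int)) (j : Nat), j < res.length →
    (pvFill v a b res).getD j [] =
      if a ≤ (j : Int) ∧ (j : Int) < b then res.getD j [] ++ [v] else res.getD j [] := by
  induction N with
  | zero =>
    intro v a b hN ha res j hj
    rw [pvFill, PySem.List.pyRange_one_eq_nil (by omega)]
    simp only [List.foldl_nil]
    rw [if_neg (by omega)]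
  | succ N ih =>
    intro v a b hN ha res j hj
    by_cases hab : a < b
    · rw [pvFill, PySem.List.pyRange_one_cons hab]
      simp only [List.foldl_cons]
      have hlen' : (PySem.List.pySetD res a ((PySem.List.pyGetD res a []) ++ [v])).length
          = res.length := PySem.List.length_pySetD ..
      have key := ih v (a + 1) b (by omega) (by omega)
        (PySem.List.pySetD res a ((PySem.List.pyGetD res a []) ++ [v])) j (by omega)
      rw [show (List.foldl
            (fun r i => PySem.List.pySetD r i ((PySem.List.pyGetD r i []) ++ [v]))
            (PySem.List.pySetD res a ((PySem.List.pyGetD res a []) ++ [v]))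
            (PySem.List.pyRange (a + 1) b 1))
          = pvFill v (a + 1) b (PySem.List.pySetD res a ((PySem.List.pyGetD res a []) ++ [v]))
          from rfl]
      rw [key]
      have hres' : (PySem.List.pySetD res a ((PySem.List.pyGetD res a []) ++ [v])).getD j [] =
          if (j : Int) = a then res.getD j [] ++ [v] else res.getD j [] := by
        rw [PySem.List.pySetD_of_nonneg res _ ha]
        by_cases hja : (j : Int) = a
        · have haj : a.toNat = j := by omega
          rw [if_pos hja]
          rw [List.getD_eq_getElem?_getD]
          simp only [List.getElem?_set, haj, hj, if_pos, Option.getD_some,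
            List.getElem?_eq_getElem hj]

          rw [PySem.List.pyGetD_eq_getElem res [] ha (show a < (res.length : Int) by omega)]
          rw [List.getD_eq_getElem res [] hj]
          simp [haj]
        · rw [if_neg hja]
          rw [List.getD_eq_getElem?_getD, List.getD_eq_getElem?_getD]
          rw [List.getElem?_set]
          rw [if_neg (by omega)]
      rw [hres']
      split_ifs <;> first | rfl | omega
    · rw [pvFill, PySem.List.pyRange_one_eq_nil (by omega)]
      simp only [List.foldl_nil]
      rw [if_neg (by omega)]

lemma pvFill_getD (v a b : Int) (ha : 0 ≤ a) (res : List (List Int)) (j : Nat)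
    (hj : j < res.length) :
    (pvFill v a b res).getD j [] =
      if a ≤ (j : Int) ∧ (j : Int) < b then res.getD j [] ++ [v] else res.getD j [] := by
  exact pvFill_getD_aux (b - a).toNat v a b le_rfl ha res j hj

lemma pvPass_length (n w o : Int) (K : Nat) (res : List (List Int)) :
    (((List.range K).map Int.ofNat).foldl
        (fun r k => pvFill (2 * k + o) (14 * k + w) (min (14 * k + w + 11) n) r) res).length
      = res.length := by
  induction K with
  | zero => rfl
  | succ K ih =>
    rw [List.range_succ, List.map_append, List.foldl_append]
    simp only [List.map_cons, List.map_nil, List.foldl_cons, List.foldl_nil]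
    rw [pvFill_length, ih]

-- one pass of Source B: phoneme value 2k+o on window [14k+w, 14k+w+11), for K values of k
lemma pvPass_getD (n w o : Int) (hw : 0 ≤ w) (K : Nat) (res : List (List Int))
    (hres : (res.length : Int) ≤ n) (j : Nat) (hj : j < res.length) :
    (((List.range K).map Int.ofNat).foldl
        (fun r k => pvFill (2 * k + o) (14 * k + w) (min (14 * k + w + 11) n) r) res).getD j [] =
      res.getD j [] ++
        (if w ≤ (j : Int) ∧ ((j : Int) - w) % 14 < 11 ∧ ((j : Int) - w) / 14 < (K : Int)
          then [2 * (((j : Int) - w) / 14) + o] else []) := by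
  induction K with
  | zero =>
    simp only [List.range_zero, List.map_nil, List.foldl_nil, Nat.cast_zero]
    rw [if_neg (by omega), List.append_nil]
  | succ K ih =>
    have hjn : (j : Int) < n := by
      have := hres; omega
    rw [List.range_succ, List.map_append, List.foldl_append]
    simp only [List.map_cons, List.map_nil, List.foldl_cons, List.foldl_nil, Int.ofNat_eq_natCast]
    have hmidlen : (((List.range K).map Int.ofNat).foldl
        (fun r k => pvFill (2 * k + o) (14 * k + w) (min (14 * k + w + 11) n) r) res).length
        = res.length := pvPass_length n w o K res
    rw [pvFill_getD _ _ _ (by omega) _ j (by rw [hmidlen]; exact hj), ih]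
    by_cases hwin : 14 * (K : Int) + w ≤ (j : Int) ∧ (j : Int) < 14 * (K : Int) + w + 11
    · rw [if_pos (show 14 * (K : Int) + w ≤ (j : Int) ∧ (j : Int) < min (14 * (K : Int) + w + 11) n by omega)]
      rw [if_neg (by omega), if_pos (by push_cast; omega)]
      have hq : ((j : Int) - w) / 14 = (K : Int) := by omega
      rw [hq]
      simp
    · rw [if_neg (by omega)]
      have hiff : (w ≤ (j : Int) ∧ ((j : Int) - w) % 14 < 11 ∧ ((j : Int) - w) / 14 < (K : Int))
          ↔ (w ≤ (j : Int) ∧ ((j : Int) - w) % 14 < 11 ∧ ((j : Int) - w) / 14 < ((K : Nat) + 1 : Nat)) := by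
        push_cast; omega
      rw [if_congr hiff rfl rfl]

lemma pvB_eq_map (slice_num : Int) (input_string : String) :
    get_input_indices_alt slice_num input_string =
      (List.range slice_num.toNat).map (fun j : Nat => pvCell (PySem.Str.len input_string) (j : Int)) := by
  have hL0 : 0 ≤ PySem.Str.len input_string := by simp [PySem.Str.len_eq]
  simp only [get_input_indices_alt]
  set L : Int := PySem.Str.len input_string with hLdef
  set n : Int := max slice_num 0 with hndef
  have hn0 : 0 ≤ n := by omega
  have hcast : (fun k : Nat => (k : Int)) = Int.ofNat := by funext k; simp
  have hK1 : PySem.Int.floordiv (L + 1) 2 = (((L + 1) / 2).toNat : Int) := by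
    rw [PySem.Int.floordiv_eq_ediv_of_pos (by norm_num)]; omega
  have hK2 : PySem.Int.floordiv L 2 = ((L / 2).toNat : Int) := by
    rw [PySem.Int.floordiv_eq_ediv_of_pos (by norm_num)]; omega
  rw [hK1, hK2, PySem.List.pyRange_zero_natCast, PySem.List.pyRange_zero_natCast, hcast]
  have heven : (fun (r : List (List Int)) (k : Int) => pvFill (2 * k) (14 * k) (min (14 * k + 11) n) r)
      = (fun (r : List (List Int)) (k : Int) =>
          pvFill (2 * k + 0) (14 * k + 0) (min (14 * k + 0 + 11) n) r) := by
    funext r k; norm_num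
  have hodd : (fun (r : List (List Int)) (k : Int) => pvFill (2 * k + 1) (14 * k + 7) (min (14 * k + 18) n) r)
      = (fun (r : List (List Int)) (k : Int) =>
          pvFill (2 * k + 1) (14 * k + 7) (min (14 * k + 7 + 11) n) r) := by
    funext r k
    congr 2
    omega
  rw [heven, hodd]
  have hlen0 : (List.replicate n.toNat ([] : List Int)).length = n.toNat := List.length_replicate
  have hlenE : (((List.range ((L + 1) / 2).toNat).map Int.ofNat).foldl
      (fun r k => pvFill (2 * k + 0) (14 * k + 0) (min (14 * k + 0 + 11) n) r)
      (List.replicate n.toNat ([] : List Int))).length = n.toNat := by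
    rw [pvPass_length, hlen0]
  apply List.ext_getElem
  · rw [pvPass_length, pvPass_length]
    simp
    omega
  · intro j h1 h2
    rw [← List.getD_eq_getElem _ [] h1, ← List.getD_eq_getElem _ [] h2]
    have hjn : j < n.toNat := by
      rw [pvPass_length, hlenE] at h1
      exact h1
    rw [pvPass_getD n 7 1 (by norm_num) ((L / 2).toNat) _ (by rw [hlenE]; omega) j (by rw [hlenE]; omega)]
    rw [pvPass_getD n 0 0 (by norm_num) (((L + 1) / 2).toNat) _ (by rw [hlen0]; omega) j (by rw [hlen0]; omega)]
    have h0 : (List.replicate n.toNat ([] : List Int)).getD j [] = [] := by simp [List.getD]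
    rw [h0]
    rw [List.getD_eq_getElem _ [] h2]
    simp only [List.getElem_map, List.getElem_range]
    rw [pvCell]
    rw [Int.toNat_of_nonneg (show (0:Int) ≤ (L + 1) / 2 by omega),
      Int.toNat_of_nonneg (show (0:Int) ≤ L / 2 by omega)]
    simp only [List.nil_append]
    congr 1
    · split_ifs with hB hA hA
      · simp only [List.cons.injEq, and_true]; omega
      · omega
      · omega
      · rfl
    · split_ifs with hB hA hA
      · simp only [List.cons.injEq, and_true]; omega
      · omega
      · omega
      · rfl

-- ===== VERDICT (by name: the statement is the Claim_ definition above) =====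
theorem get_input_indices_spec : Claim_equal_get_input_indices := by
  intro slice_num input_string _
  unfold Spec_get_input_indices
  rw [pvA_eq_map, pvB_eq_map]
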